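-- pv_equiv track=rewrite | github.com/alpha3002025/daily-codingtest | programmers/sliding-window/lv2-서버-증설-횟수/solution-20260114-1.py | solution
-- ===== SOURCE A (Python) =====
-- def solution(players, m, k):
--     answer = 0
--
--     server_cnt = [0] * 24
--
--     for i, player_cnt in enumerate(players):
--         required_server_cnt = player_cnt // m
--
--         if required_server_cnt > server_cnt[i]:
--             diff = required_server_cnt - server_cnt[i]
--             answer += diff
--
--             end = min(24, i + k)
--             for window_idx in range(i, end):
--                 server_cnt[window_idx] += diff
--
--     return answer
-- ===== SOURCE B (Python) =====
-- def solution(players, m, k):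
--     # Running active-server count plus scheduled expirations instead of a
--     # per-hour count array filled forward over each window.
--     answer = 0
--     current = 0
--     n = len(players)
--     expire = [0] * n
--     for i, p in enumerate(players):
--         current -= expire[i]
--         required = p // m
--         if required > current:
--             diff = required - current
--             answer += diff
--             if k > 0:
--                 current += diff
--                 if i + k < n:
--                     expire[i + k] += diff
--     return answer
-- ===== Notes on version B (the rewrite author's own statement) =====
-- stated objective: alternative
-- what changed: Replaces A's 24-slot per-hour server-count array, re-filled forward over every k-hour window, by a single running active-server count plus an expiry schedule (one O(1) update per hour instead of an inner window loop).
import Mathlib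
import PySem

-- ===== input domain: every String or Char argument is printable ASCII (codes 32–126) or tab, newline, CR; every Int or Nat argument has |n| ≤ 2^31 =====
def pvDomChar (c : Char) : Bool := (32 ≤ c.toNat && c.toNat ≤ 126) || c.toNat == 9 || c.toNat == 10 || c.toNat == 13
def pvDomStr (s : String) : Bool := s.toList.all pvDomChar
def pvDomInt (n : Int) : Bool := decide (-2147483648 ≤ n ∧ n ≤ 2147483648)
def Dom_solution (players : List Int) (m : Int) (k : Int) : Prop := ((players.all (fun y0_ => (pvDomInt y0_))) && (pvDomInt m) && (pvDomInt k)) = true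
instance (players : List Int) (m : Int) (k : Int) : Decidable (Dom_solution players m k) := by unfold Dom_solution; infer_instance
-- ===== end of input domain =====

-- B replaces A's per-hour count array (re-filled over each k-window) by one running
-- active-server count plus an expiry schedule: a different bookkeeping, same result.

-- ===== PORT A =====
-- inner loop `for window_idx in range(i, end): server_cnt[window_idx] += diff`
def pvAddRange (sc : List Int) (i e diff : Int) : List Int :=
  (PySem.List.pyRange i e 1).foldl
    (fun acc j => PySem.List.pySetD acc j (PySem.List.pyGetD acc j 0 + diff)) sc

-- loop body of A (indexing is in range under Pre_solution: i < len(players) ≤ 24)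
def pvStepA (m k : Int) (st : Int × List Int) (ip : Int × Int) : Int × List Int :=
  let required := PySem.Int.floordiv ip.2 m
  if PySem.List.pyGetD st.2 ip.1 0 < required then
    let diff := required - PySem.List.pyGetD st.2 ip.1 0
    (st.1 + diff, pvAddRange st.2 ip.1 (min 24 (ip.1 + k)) diff)
  else st

def solution (players : List Int) (m : Int) (k : Int) : Int :=
  ((PySem.List.enumerate players 0).foldl (pvStepA m k) (0, List.replicate 24 0)).1

-- ===== PORT B =====
-- loop body of B; n = len(players); state (answer, current, expire)
def pvStepB (m k n : Int) (st : Int × Int × List Int) (ip : Int × Int) : Int × Int × List Int :=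
  let cur := st.2.1 - PySem.List.pyGetD st.2.2 ip.1 0
  let required := PySem.Int.floordiv ip.2 m
  if cur < required then
    let diff := required - cur
    if 0 < k then
      if ip.1 + k < n then
        (st.1 + diff, cur + diff,
         PySem.List.pySetD st.2.2 (ip.1 + k) (PySem.List.pyGetD st.2.2 (ip.1 + k) 0 + diff))
      else (st.1 + diff, cur + diff, st.2.2)
    else (st.1 + diff, cur, st.2.2)
  else (st.1, cur, st.2.2)

def solution_alt (players : List Int) (m : Int) (k : Int) : Int :=
  ((PySem.List.enumerate players 0).foldl (pvStepB m k (players.length : Int))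
    (0, 0, List.replicate players.length 0)).1

-- ===== PRECONDITION & SPEC =====
-- Pre_ excludes exactly the inputs where Python A raises: m = 0 with a nonempty list
-- (ZeroDivisionError) and more than 24 hours (IndexError on the fixed-size 24-slot array).
def Pre_solution (players : List Int) (m : Int) (k : Int) : Prop :=
  (players = [] ∨ m ≠ 0) ∧ players.length ≤ 24
instance (players : List Int) (m : Int) (k : Int) : Decidable (Pre_solution players m k) := by
  unfold Pre_solution; infer_instance

def pvWitness_solution : List Int × Int × Int := ([10, 3, 7], 2, 2)

def Spec_solution (players : List Int) (m : Int) (k : Int) (out : Int) : Prop := out = solution_alt players m k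
instance (players : List Int) (m : Int) (k : Int) (out : Int) : Decidable (Spec_solution players m k out) := by unfold Spec_solution; infer_instance

-- ===== CLAIM (what is proved, stated in full; the proofs are below) =====
def Claim_equal_solution : Prop := ∀ (players : List Int) (m : Int) (k : Int), Dom_solution players m k → Pre_solution players m k → Spec_solution players m k (solution players m k)

-- ===== LEMMAS AND PROOFS =====

-- window sum of the expiry schedule
def pvSEx (ex : List Int) (a b : Nat) : Int := ∑ j ∈ Finset.Ico a b, ex.getD j 0

lemma pv_getD_set (l : List Int) (i : Nat) (v : Int) (t : Nat) (h : i < l.length) :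
    (l.set i v).getD t 0 = if t = i then v else l.getD t 0 := by
  by_cases h1 : t = i
  · subst h1; simp [List.getD_eq_getElem?_getD, h]
  · simp [List.getD_eq_getElem?_getD, List.getElem?_set_ne (by omega : i ≠ t), h1]

lemma pv_sEx_set (ex : List Int) (i : Nat) (d : Int) (a b : Nat) (h : i < ex.length) :
    pvSEx (ex.set i (ex.getD i 0 + d)) a b
      = pvSEx ex a b + (if a ≤ i ∧ i < b then d else 0) := by
  unfold pvSEx
  have hcong : ∀ j ∈ Finset.Ico a b,
      (ex.set i (ex.getD i 0 + d)).getD j 0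
        = ex.getD j 0 + (if j = i then d else 0) := by
    intro j _
    rw [pv_getD_set _ _ _ _ h]
    split_ifs with hj <;> simp [hj]
  rw [Finset.sum_congr rfl hcong, Finset.sum_add_distrib, Finset.sum_ite_eq' (Finset.Ico a b)]
  simp [Finset.mem_Ico]

lemma pv_sEx_bot (ex : List Int) (a b : Nat) (hab : a < b) :
    pvSEx ex a b = ex.getD a 0 + pvSEx ex (a + 1) b := by
  unfold pvSEx
  exact Finset.sum_eq_sum_Ico_succ_bot hab _

lemma pv_addRange_nil (sc : List Int) (i e diff : Int) (h : e ≤ i) :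
    pvAddRange sc i e diff = sc := by
  unfold pvAddRange
  rw [PySem.List.pyRange_one_eq_nil h]
  rfl

lemma pv_addRange_len (d : Nat) : ∀ (sc : List Int) (i e diff : Int), (e - i).toNat = d →
    (pvAddRange sc i e diff).length = sc.length := by
  induction d with
  | zero =>
    intro sc i e diff hd
    rw [pv_addRange_nil sc i e diff (by omega)]
  | succ d ih =>
    intro sc i e diff hd
    have hie : i < e := by omega
    unfold pvAddRange
    rw [PySem.List.pyRange_one_cons hie, List.foldl_cons]
    have := ih (PySem.List.pySetD sc i (PySem.List.pyGetD sc i 0 + diff)) (i + 1) e diff (by omega)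
    unfold pvAddRange at this
    rw [this, PySem.List.length_pySetD]

lemma pv_addRange_getD (d : Nat) :
    ∀ (sc : List Int) (i e diff : Int), (e - i).toNat = d → 0 ≤ i → e ≤ (sc.length : Int) →
    ∀ t : Nat,
    (pvAddRange sc i e diff).getD t 0
      = sc.getD t 0 + (if i ≤ (t : Int) ∧ (t : Int) < e then diff else 0) := by
  induction d with
  | zero =>
    intro sc i e diff hd hi he t
    rw [pv_addRange_nil sc i e diff (by omega)]
    have : ¬ (i ≤ (t : Int) ∧ (t : Int) < e) := by omega
    simp [this]
  | succ d ih =>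
    intro sc i e diff hd hi he t
    have hie : i < e := by omega
    have hlen : i.toNat < sc.length := by omega
    unfold pvAddRange
    rw [PySem.List.pyRange_one_cons hie, List.foldl_cons]
    have hset : PySem.List.pySetD sc i (PySem.List.pyGetD sc i 0 + diff)
        = sc.set i.toNat (sc.getD i.toNat 0 + diff) := by
      rw [PySem.List.pySetD_of_nonneg _ _ hi, PySem.List.pyGetD_of_nonneg _ _ hi]
    rw [hset]
    have hrec := ih (sc.set i.toNat (sc.getD i.toNat 0 + diff)) (i + 1) e diff (by omega)
      (by omega) (by rw [List.length_set]; omega) t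
    unfold pvAddRange at hrec
    rw [hrec, pv_getD_set _ _ _ _ hlen]
    by_cases hti : (t : Int) = i
    · have h1 : t = i.toNat := by omega
      rw [if_pos h1, if_neg (by omega : ¬ (i + 1 ≤ (t : Int) ∧ (t : Int) < e)),
        if_pos (by omega : i ≤ (t : Int) ∧ (t : Int) < e)]
      subst h1
      ring
    · have h1 : ¬ t = i.toNat := by omega
      rw [if_neg h1]
      by_cases hc : i ≤ (t : Int) ∧ (t : Int) < e
      · rw [if_pos hc, if_pos (by omega : i + 1 ≤ (t : Int) ∧ (t : Int) < e)]
      · rw [if_neg hc, if_neg (by omega : ¬ (i + 1 ≤ (t : Int) ∧ (t : Int) < e))]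

-- the core simulation: A's fold over the remaining hours equals B's, given the invariant
lemma pv_main (m k : Int) (rest : List Int) :
    ∀ (s : Nat) (N : Nat) (ans cur : Int) (sc ex : List Int),
    s + rest.length = N → N ≤ 24 → sc.length = 24 → ex.length = N →
    (∀ t : Nat, s ≤ t → t < N → sc.getD t 0 = cur - pvSEx ex s (t + 1)) →
    ((PySem.List.enumerate rest (s : Int)).foldl (pvStepA m k) (ans, sc)).1
      = ((PySem.List.enumerate rest (s : Int)).foldl (pvStepB m k (N : Int)) (ans, cur, ex)).1 := by
  induction rest with
  | nil => intro s N ans cur sc ex _ _ _ _ _; simp [PySem.List.enumerate_nil]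
  | cons p rest ih =>
    intro s N ans cur sc ex hN h24 hsc hex H
    rw [PySem.List.enumerate_cons, List.foldl_cons, List.foldl_cons]
    have hsN : s < N := by simp at hN; omega
    have hscs : sc.getD s 0 = cur - ex.getD s 0 := by
      have h0 := H s (le_refl s) hsN
      rw [pv_sEx_bot ex s (s + 1) (by omega)] at h0
      have h1 : pvSEx ex (s + 1) (s + 1) = 0 := by
        unfold pvSEx; rw [Finset.Ico_self, Finset.sum_empty]
      rw [h1] at h0; linarith
    have hgA : PySem.List.pyGetD sc (s : Int) 0 = sc.getD s 0 := by
      simp [PySem.List.pyGetD_natCast]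
    have hgB : PySem.List.pyGetD ex (s : Int) 0 = ex.getD s 0 := by
      simp [PySem.List.pyGetD_natCast]
    set req := PySem.Int.floordiv p m with hreq
    show ((PySem.List.enumerate rest ((s : Int) + 1)).foldl (pvStepA m k)
        (pvStepA m k (ans, sc) ((s : Int), p))).1 = _
    have hs1 : ((s : Int) + 1) = ((s + 1 : Nat) : Int) := by push_cast; ring
    by_cases hcond : sc.getD s 0 < req
    · -- servers must be added
      have hcondB : cur - ex.getD s 0 < req := by omega
      have hdiff : req - sc.getD s 0 = req - (cur - ex.getD s 0) := by omega
      set diff := req - sc.getD s 0 with hdiffdef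
      have hstepA : pvStepA m k (ans, sc) ((s : Int), p)
          = (ans + diff, pvAddRange sc (s : Int) (min 24 ((s : Int) + k)) diff) := by
        unfold pvStepA
        simp only [hgA, ← hreq]
        rw [if_pos hcond]
      rw [hstepA]
      set e := min (24 : Int) ((s : Int) + k) with he
      set sc' := pvAddRange sc (s : Int) e diff with hsc'
      have hlen' : sc'.length = 24 := by
        rw [hsc', pv_addRange_len ((e - (s : Int)).toNat) sc (s : Int) e diff rfl, hsc]
      have hgetD' : ∀ t : Nat, sc'.getD t 0
          = sc.getD t 0 + (if (s : Int) ≤ (t : Int) ∧ (t : Int) < e then diff else 0) := by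
        intro t
        exact pv_addRange_getD ((e - (s : Int)).toNat) sc (s : Int) e diff rfl (by omega)
          (by rw [hsc]; omega) t
      by_cases hk : 0 < k
      · by_cases hin : (s : Int) + k < (N : Int)
        · -- expiry recorded inside the schedule
          have hpos : ((s : Int) + k).toNat = s + k.toNat := by omega
          have hposlen : s + k.toNat < ex.length := by omega
          have hstepB : pvStepB m k (N : Int) (ans, cur, ex) ((s : Int), p)
              = (ans + diff, (cur - ex.getD s 0) + diff,
                 ex.set (s + k.toNat) (ex.getD (s + k.toNat) 0 + diff)) := by
            unfold pvStepB
            simp only [hgB, ← hreq]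
            rw [if_pos hcondB, if_pos hk, if_pos hin]
            have hg2 : PySem.List.pyGetD ex ((s : Int) + k) 0 = ex.getD (s + k.toNat) 0 := by
              rw [PySem.List.pyGetD_of_nonneg _ _ (by omega), hpos]
            rw [PySem.List.pySetD_of_nonneg _ _ (by omega : (0:Int) ≤ (s : Int) + k), hpos, hg2, hdiff]
          rw [hstepB, hs1]
          apply ih (s + 1) N (ans + diff) ((cur - ex.getD s 0) + diff) sc'
            (ex.set (s + k.toNat) (ex.getD (s + k.toNat) 0 + diff))
            (by simp at hN ⊢; omega) h24 hlen' (by rw [List.length_set]; exact hex)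
          intro t hts htN
          rw [hgetD', pv_sEx_set ex (s + k.toNat) diff (s + 1) (t + 1) hposlen]
          have hHt := H t (by omega) htN
          rw [pv_sEx_bot ex s (t + 1) (by omega)] at hHt
          have hcase : ((s : Int) ≤ (t : Int) ∧ (t : Int) < e) ↔ ¬ (s + 1 ≤ s + k.toNat ∧ s + k.toNat < t + 1) := by
            omega
          by_cases hc : (s : Int) ≤ (t : Int) ∧ (t : Int) < e
          · rw [if_pos hc, if_neg (hcase.mp hc)]
            omega
          · rw [if_neg hc, if_pos (by by_contra hno; exact hc (hcase.mpr hno))]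
            omega
        · -- servers stay active to the end of the schedule
          have hstepB : pvStepB m k (N : Int) (ans, cur, ex) ((s : Int), p)
              = (ans + diff, (cur - ex.getD s 0) + diff, ex) := by
            unfold pvStepB
            simp only [hgB, ← hreq]
            rw [if_pos hcondB, if_pos hk, if_neg hin, hdiff]
          rw [hstepB, hs1]
          apply ih (s + 1) N (ans + diff) ((cur - ex.getD s 0) + diff) sc' ex
            (by simp at hN ⊢; omega) h24 hlen' hex
          intro t hts htN
          have hHt := H t (by omega) htN
          rw [pv_sEx_bot ex s (t + 1) (by omega)] at hHt
          have hc : (s : Int) ≤ (t : Int) ∧ (t : Int) < e := by omega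
          rw [hgetD', if_pos hc]
          omega
      · -- k ≤ 0: the window is empty, servers never become active
        have hscsame : sc' = sc := by
          rw [hsc']
          exact pv_addRange_nil sc (s : Int) e diff (by omega)
        have hstepB : pvStepB m k (N : Int) (ans, cur, ex) ((s : Int), p)
            = (ans + diff, cur - ex.getD s 0, ex) := by
          unfold pvStepB
          simp only [hgB, ← hreq]
          rw [if_pos hcondB, if_neg hk, hdiff]
        rw [hstepB, hscsame, hs1]
        apply ih (s + 1) N (ans + diff) (cur - ex.getD s 0) sc ex
          (by simp at hN ⊢; omega) h24 hsc hex
        intro t hts htN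
        have hHt := H t (by omega) htN
        rw [pv_sEx_bot ex s (t + 1) (by omega)] at hHt
        omega
    · -- no servers added this hour
      have hcondB : ¬ (cur - ex.getD s 0 < req) := by omega
      have hstepA : pvStepA m k (ans, sc) ((s : Int), p) = (ans, sc) := by
        unfold pvStepA
        simp only [hgA, ← hreq]
        rw [if_neg hcond]
      have hstepB : pvStepB m k (N : Int) (ans, cur, ex) ((s : Int), p)
          = (ans, cur - ex.getD s 0, ex) := by
        unfold pvStepB
        simp only [hgB, ← hreq]
        rw [if_neg hcondB]
      rw [hstepA, hstepB, hs1]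
      apply ih (s + 1) N ans (cur - ex.getD s 0) sc ex
        (by simp at hN ⊢; omega) h24 hsc hex
      intro t hts htN
      have hHt := H t (by omega) htN
      rw [pv_sEx_bot ex s (t + 1) (by omega)] at hHt
      omega

-- ===== VERDICT (by name: the statement is the Claim_ definition above) =====
theorem solution_spec : Claim_equal_solution := by
  intro players m k _ hpre
  unfold Pre_solution at hpre
  unfold Spec_solution solution solution_alt
  apply pv_main m k players 0 players.length 0 0 (List.replicate 24 0)
    (List.replicate players.length 0) (by simp) hpre.2 (by simp) (by simp)
  intro t _ _
  have h1 : (List.replicate 24 (0 : Int)).getD t 0 = 0 := by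
    rw [List.getD_eq_getElem?_getD, List.getElem?_replicate]
    split <;> rfl
  have h2 : pvSEx (List.replicate players.length 0) 0 (t + 1) = 0 := by
    unfold pvSEx
    apply Finset.sum_eq_zero
    intro j _
    rw [List.getD_eq_getElem?_getD, List.getElem?_replicate]
    split <;> rfl
  rw [h1, h2]
  ring
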